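-- pv_equiv track=rewrite | github.com/cfwelch/targeted_sentiment | acronyms.py | acronymInArray
-- ===== SOURCE A (Python) =====
-- import math
--
-- def acronymInArray(parts, input):
-- 	bmax = math.pow(2, len(parts));
-- 	for j in range(1, int(bmax)):
-- 		thetry = "";
-- 		bstr = padString(str(bin(j))[2:], len(parts));
-- 		for k in range(0, len(bstr)):
-- 			if "1" == bstr[k]:
-- 				thetry += parts[k][0];
-- 		if thetry == input.lower():
-- 			return True;
-- 	return False;
--
-- def padString(input, length):
-- 	retstr = input;
-- 	for i in range(0, length - len(input)):
-- 		retstr = "0" + retstr;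
-- 	return retstr;
-- ===== SOURCE B (Python) =====
-- def acronymInArray(parts, input):
--     target = input.lower()
--     if not target:
--         return False
--     return _is_subseq(list(target), [p[0] for p in parts])
--
-- def _is_subseq(t, hs):
--     # greedy subsequence match: t is a subsequence of hs
--     if not t:
--         return True
--     if not hs:
--         return False
--     if hs[0] == t[0]:
--         return _is_subseq(t[1:], hs[1:])
--     return _is_subseq(t, hs[1:])
-- ===== Notes on version B (the rewrite author's own statement) =====
-- stated objective: faster
-- what changed: Replaces the exponential enumeration of all 2^n bitmask subsets (each rebuilt via a padded binary string) with a single greedy subsequence match of input.lower() against the parts' first letters, which decides the same question because a subset of first letters in order spelling the target is exactly a subsequence.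
-- outside the precondition, e.g. on acronymInArray(['a', '', 'x'], 'x'): A returns True, B raises IndexError
import Mathlib
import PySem

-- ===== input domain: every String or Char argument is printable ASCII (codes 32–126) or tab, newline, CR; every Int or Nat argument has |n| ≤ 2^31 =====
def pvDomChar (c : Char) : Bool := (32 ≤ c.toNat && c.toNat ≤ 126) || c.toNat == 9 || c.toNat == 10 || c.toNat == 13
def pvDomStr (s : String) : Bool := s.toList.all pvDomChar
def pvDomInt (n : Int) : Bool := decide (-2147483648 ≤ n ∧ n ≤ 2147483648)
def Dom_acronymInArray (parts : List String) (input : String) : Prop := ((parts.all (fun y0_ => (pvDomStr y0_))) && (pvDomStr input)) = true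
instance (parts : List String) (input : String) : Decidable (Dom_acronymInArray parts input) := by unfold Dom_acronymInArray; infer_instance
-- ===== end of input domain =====

-- B replaces A's enumeration of all 2^n bitmask subsets of `parts` by a single greedy
-- subsequence match of input.lower() against the parts' first letters (objective: faster).

-- ===== PORT A =====
-- padString: retstr = input; for i in range(0, length - len(input)): retstr = "0" + retstr
def pvPadChars (inp : List Char) (length : Int) : List Char :=
  (PySem.List.pyRange 0 (length - inp.length)).foldl (fun retstr _ => '0' :: retstr) inp

def acronymInArray (parts : List String) (input : String) : Bool :=
  -- bmax = int(math.pow(2, len(parts))) = 2^len(parts): math.pow(2, n) is the exact float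
  -- power of two here (it overflows only from 1024 parts on, unreachable for this 2^n-step loop)
  let bmax : Int := 2 ^ parts.length
  -- for j in range(1, int(bmax)): … return True on the first match, False after the loop
  (PySem.List.pyRange 1 bmax).any (fun j =>
    -- bstr = padString(str(bin(j))[2:], len(parts))
    let bstr : List Char :=
      pvPadChars (PySem.Chars.slice (PySem.Int.pyBin j).toList (some 2) none) (parts.length : Int)
    -- thetry = ""; for k in range(0, len(bstr)): if "1" == bstr[k]: thetry += parts[k][0]
    let thetry : List Char := (PySem.List.pyRange 0 (bstr.length : Int)).foldl
      (fun thetry k =>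
        if ('1' : Char) == PySem.List.pyGetD bstr k ' '
        then thetry ++ [(PySem.Str.pyGet? (PySem.List.pyGetD parts k "") 0).getD '?']
        else thetry) []
    thetry == (PySem.Str.lower input).toList)

-- ===== PORT B =====
-- p[0] (the parts are nonempty under Pre_)
def pvFirst (p : String) : Char := (PySem.Str.pyGet? p 0).getD '?'

-- _is_subseq(t, hs): greedy subsequence match
def pvIsSubseq : List Char → List Char → Bool
  | [], _ => true
  | _, [] => false
  | a :: t, h :: hs => if h == a then pvIsSubseq t hs else pvIsSubseq (a :: t) hs

def acronymInArray_alt (parts : List String) (input : String) : Bool :=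
  let target := (PySem.Str.lower input).toList
  if target.isEmpty then false
  else pvIsSubseq target (parts.map pvFirst)

-- ===== PRECONDITION & SPEC =====
-- Pre_ excludes lists containing an empty string: on those parts[k][0] raises IndexError in A
-- on the first mask selecting the empty part (A can still return True earlier; B always raises).
def Pre_acronymInArray (parts : List String) (input : String) : Prop := ∀ p ∈ parts, p ≠ ""
instance (parts : List String) (input : String) : Decidable (Pre_acronymInArray parts input) := by unfold Pre_acronymInArray; infer_instance

def pvWitness_acronymInArray : List String × String := (["ab", "ba", "cd"], "Ac")

def Spec_acronymInArray (parts : List String) (input : String) (out : Bool) : Prop := out = acronymInArray_alt parts input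
instance (parts : List String) (input : String) (out : Bool) : Decidable (Spec_acronymInArray parts input out) := by unfold Spec_acronymInArray; infer_instance

-- ===== CLAIM (what is proved, stated in full; the proofs are below) =====
def Claim_equal_acronymInArray : Prop := ∀ (parts : List String) (input : String), Dom_acronymInArray parts input → Pre_acronymInArray parts input → Spec_acronymInArray parts input (acronymInArray parts input)

-- ===== LEMMAS AND PROOFS =====

-- `parts[k]`'s selected character, as a function of the index list
def pvSel : List Char → List Bool → List Char
  | _, [] => []
  | [], _ :: _ => []
  | h :: hs, b :: bs => if b then h :: pvSel hs bs else pvSel hs bs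

-- the k-th (from the left) of the n low bits of j, MSB first
def pvBits : Nat → Nat → List Bool
  | 0, _ => []
  | n + 1, j => pvBits n (j / 2) ++ [decide (j % 2 = 1)]

-- padString prepends zeros
theorem pvPad_foldl (l : List Int) (cs : List Char) :
    l.foldl (fun r (_ : Int) => '0' :: r) cs = List.replicate l.length '0' ++ cs := by
  induction l generalizing cs with
  | nil => rfl
  | cons x l ih =>
    simp only [List.foldl_cons, ih, List.length_cons, List.replicate_succ']
    simp

theorem pvPadChars_eq (cs : List Char) (n : Nat) :
    pvPadChars cs (n : Int) = List.replicate (n - cs.length) '0' ++ cs := by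
  unfold pvPadChars
  rw [pvPad_foldl]
  congr 1
  rw [PySem.List.pyRange_zero]
  simp [Int.toNat_sub']

-- fuel-generic facts about Nat.toDigitsCore
theorem pvToDigitsCore_step (b f n : Nat) (ds : List Char) :
    Nat.toDigitsCore b (f + 1) n ds =
      if n / b = 0 then (n % b).digitChar :: ds
      else Nat.toDigitsCore b f (n / b) ((n % b).digitChar :: ds) := by
  conv_lhs => rw [Nat.toDigitsCore]

theorem pvToDigitsCore_acc (b f : Nat) : ∀ (n : Nat) (l : List Char),
    Nat.toDigitsCore b f n l = Nat.toDigitsCore b f n [] ++ l := by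
  induction f with
  | zero => intro n l; rfl
  | succ f ih =>
    intro n l
    rw [pvToDigitsCore_step, pvToDigitsCore_step]
    by_cases h : n / b = 0
    · simp [h]
    · simp only [h, if_false]
      rw [ih (n / b) ((n % b).digitChar :: l), ih (n / b) [(n % b).digitChar]]
      simp

theorem pvToDigitsCore_fuel (f₁ : Nat) : ∀ (f₂ n : Nat) (l : List Char), n < f₁ → n < f₂ →
    Nat.toDigitsCore 2 f₁ n l = Nat.toDigitsCore 2 f₂ n l := by
  induction f₁ with
  | zero => intro f₂ n l h1 _; omega
  | succ f₁ ih =>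
    intro f₂ n l h1 h2
    obtain ⟨f₂', rfl⟩ : ∃ k, f₂ = k + 1 := ⟨f₂ - 1, by omega⟩
    rw [pvToDigitsCore_step, pvToDigitsCore_step]
    by_cases h : n / 2 = 0
    · simp [h]
    · simp only [h, if_false]
      exact ih f₂' (n / 2) _ (by omega) (by omega)

theorem pvToDigits_two_step (m : Nat) (h : 2 ≤ m) :
    Nat.toDigits 2 m = Nat.toDigits 2 (m / 2) ++ [Nat.digitChar (m % 2)] := by
  unfold Nat.toDigits
  obtain ⟨f, hf⟩ : ∃ k, m + 1 = k + 1 := ⟨m, rfl⟩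
  rw [hf, pvToDigitsCore_step]
  have hne : ¬ m / 2 = 0 := by omega
  simp only [hne, if_false]
  rw [pvToDigitsCore_acc, pvToDigitsCore_fuel f (m / 2 + 1) (m / 2) [] (by omega) (by omega)]

theorem pvBits_length (n j : Nat) : (pvBits n j).length = n := by
  induction n generalizing j with
  | zero => rfl
  | succ n ih => simp [pvBits, ih]

theorem pvBits_zero (n : Nat) : pvBits n 0 = List.replicate n false := by
  induction n with
  | zero => rfl
  | succ n ih => simp [pvBits, ih, List.replicate_succ']

-- the padded binary string of 1 ≤ m < 2^n is the character image of pvBits n m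
theorem pvSel_nil_right (hs : List Char) : pvSel hs [] = [] := by
  cases hs <;> rfl

theorem pvDigits_one : Nat.toDigits 2 1 = ['1'] := rfl

theorem pvPadBits (n : Nat) : ∀ m : Nat, 1 ≤ m → m < 2 ^ n →
    List.replicate (n - (Nat.toDigits 2 m).length) '0' ++ Nat.toDigits 2 m
      = (pvBits n m).map (fun b => if b then '1' else '0') := by
  induction n with
  | zero => intro m h1 h2; omega
  | succ n ih =>
    intro m h1 h2
    by_cases hm : m = 1
    · subst hm
      simp [pvDigits_one, pvBits, pvBits_zero]
    · have h2m : 2 ≤ m := by omega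
      rw [pvToDigits_two_step m h2m]
      have hhalf : 1 ≤ m / 2 := by omega
      have hlt : m / 2 < 2 ^ n := by
        have : 2 ^ (n + 1) = 2 * 2 ^ n := by ring
        omega
      have hd : Nat.digitChar (m % 2) = if decide (m % 2 = 1) then '1' else '0' := by
        rcases Nat.mod_two_eq_zero_or_one m with h | h <;> simp [h, Nat.digitChar]
      have hlen : (Nat.toDigits 2 (m / 2)).length ≤ n := by
        have := Nat.toDigits_length 2 (m / 2) n (by
          rcases Nat.eq_zero_or_pos n with rfl | hn
          · omega
          · exact hn) (by
          rcases Nat.eq_zero_or_pos n with rfl | hn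
          · simp at hlt; omega
          · exact hlt)
        exact this
      simp only [List.length_append, List.length_singleton]
      have harith : n + 1 - ((Nat.toDigits 2 (m / 2)).length + 1)
          = n - (Nat.toDigits 2 (m / 2)).length := by omega
      rw [harith, ← List.append_assoc, ih (m / 2) hhalf hlt]
      simp [pvBits, hd]

theorem pvBits_surj (bs : List Bool) : ∃ j, j < 2 ^ bs.length ∧ pvBits bs.length j = bs := by
  induction bs using List.reverseRecOn with
  | nil => exact ⟨0, by simp, rfl⟩
  | append_singleton l b ih =>
    obtain ⟨j, hj, hb⟩ := ih
    refine ⟨2 * j + (if b then 1 else 0), ?_, ?_⟩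
    · have : 2 ^ (l.length + 1) = 2 * 2 ^ l.length := by ring
      cases b <;> simp <;> omega
    · have hlen : (l ++ [b]).length = l.length + 1 := by simp
      rw [hlen]
      show pvBits l.length ((2 * j + if b then 1 else 0) / 2)
          ++ [decide ((2 * j + if b then 1 else 0) % 2 = 1)] = l ++ [b]
      cases b <;> simp only [if_true, if_false, Bool.false_eq_true]
      · have h2 : (2 * j + 0) / 2 = j := by omega
        have h3 : (2 * j + 0) % 2 = 0 := by omega
        rw [h2, h3, hb]; simp
      · have h2 : (2 * j + 1) / 2 = j := by omega
        have h3 : (2 * j + 1) % 2 = 1 := by omega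
        rw [h2, h3, hb]; simp

theorem pvBits_any (n : Nat) : ∀ j : Nat, j < 2 ^ n → (pvBits n j).any id = false → j = 0 := by
  induction n with
  | zero => intro j hj _; simpa using hj
  | succ n ih =>
    intro j hj ha
    simp only [pvBits, List.any_append, List.any_cons, List.any_nil, id,
      Bool.or_eq_false_iff, decide_eq_false_iff_not] at ha
    have hlt : j / 2 < 2 ^ n := by
      have : 2 ^ (n + 1) = 2 * 2 ^ n := by ring
      omega
    have := ih (j / 2) hlt ha.1
    omega

-- A's inner loop builds pvSel
theorem pvInner (cs : List Char) : ∀ (hs acc : List Char), cs.length = hs.length →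
    (List.range cs.length).foldl
      (fun a k => if ('1' : Char) == cs.getD k ' ' then a ++ [hs.getD k '?'] else a) acc
      = acc ++ pvSel hs (cs.map (fun c => decide (c = '1'))) := by
  induction cs with
  | nil => intro hs acc _; simp [pvSel_nil_right]
  | cons c cs ih =>
    intro hs acc h
    cases hs with
    | nil => simp at h
    | cons hh hs =>
      simp only [List.length_cons] at h
      rw [List.length_cons, List.range_succ_eq_map]
      simp only [List.foldl_cons, List.foldl_map, List.getD_cons_zero, List.getD_cons_succ]
      rw [ih hs _ (by omega)]
      by_cases hc : c = '1'
      · subst hc; simp [pvSel]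
      · have hbeq : (('1' : Char) == c) = false := by
          simp; exact fun h' => hc h'.symm
        simp [pvSel, hbeq, hc]

theorem pvSel_sublist (hs : List Char) (bs : List Bool) : (pvSel hs bs).Sublist hs := by
  induction hs generalizing bs with
  | nil => cases bs <;> simp [pvSel]
  | cons h hs ih =>
    cases bs with
    | nil => simp [pvSel_nil_right]
    | cons b bs =>
      show (if b then h :: pvSel hs bs else pvSel hs bs).Sublist (h :: hs)
      cases b
      · simpa using (ih bs).cons h
      · simpa using (ih bs).cons₂ h

theorem pvSel_all_false (hs : List Char) (bs : List Bool) (h : bs.any id = false) :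
    pvSel hs bs = [] := by
  induction hs generalizing bs with
  | nil => cases bs <;> rfl
  | cons hh hs ih =>
    cases bs with
    | nil => rfl
    | cons b bs =>
      simp only [List.any_cons, id, Bool.or_eq_false_iff] at h
      show (if b then hh :: pvSel hs bs else pvSel hs bs) = []
      rw [if_neg (by simp [h.1]), ih bs h.2]

theorem pvSel_ne_nil (hs : List Char) (bs : List Bool) (hl : bs.length = hs.length)
    (ha : bs.any id = true) : pvSel hs bs ≠ [] := by
  induction hs generalizing bs with
  | nil => cases bs with
    | nil => simp at ha
    | cons b bs => simp at hl
  | cons hh hs ih =>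
    cases bs with
    | nil => simp at ha
    | cons b bs =>
      show (if b then hh :: pvSel hs bs else pvSel hs bs) ≠ []
      cases b
      · have ha' : bs.any id = true := by simpa using ha
        rw [if_neg (by simp)]
        exact ih bs (by simpa using hl) ha' 
      · simp

theorem pvSublist_sel (t hs : List Char) (h : t.Sublist hs) :
    ∃ bs, bs.length = hs.length ∧ pvSel hs bs = t := by
  induction h with
  | slnil => exact ⟨[], rfl, rfl⟩
  | cons a h ih =>
    obtain ⟨bs, hl, hsel⟩ := ih
    exact ⟨false :: bs, by simp [hl], by simpa [pvSel] using hsel⟩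
  | cons₂ a h ih =>
    obtain ⟨bs, hl, hsel⟩ := ih
    exact ⟨true :: bs, by simp [hl], by simpa [pvSel] using hsel⟩

theorem pvIsSubseq_eq (t hs : List Char) : pvIsSubseq t hs = t.isSublist hs := by
  induction hs generalizing t with
  | nil => cases t <;> rfl
  | cons h hs ih =>
    cases t with
    | nil => rfl
    | cons a t =>
      show (if h == a then pvIsSubseq t hs else pvIsSubseq (a :: t) hs) = _
      rw [List.isSublist]
      by_cases hah : a = h
      · subst hah; simp [ih]
      · have h1 : (h == a) = false := by simp; exact fun h' => hah h'.symm
        have h2 : (a == h) = false := by simp [hah]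
        simp [h1, h2, ih]

-- the binary string A builds for candidate m, in terms of pvBits
theorem pvBstr (n m : Nat) (h1 : 1 ≤ m) (h2 : m < 2 ^ n) :
    pvPadChars (PySem.Chars.slice (PySem.Int.pyBin (m : Int)).toList (some 2) none) (n : Int)
      = (pvBits n m).map (fun b => if b then '1' else '0') := by
  have hbin : (PySem.Int.pyBin (m : Int)).toList = '0' :: 'b' :: Nat.toDigits 2 m := by
    rw [PySem.Int.toList_pyBin]
    simp [PySem.Int.toBinChars0b]
  rw [hbin]
  have hsl : PySem.Chars.slice ('0' :: 'b' :: Nat.toDigits 2 m) (some 2) none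
      = Nat.toDigits 2 m := by simp [pysem]
  rw [hsl, pvPadChars_eq, pvPadBits n m h1 h2]

-- A's loop body for candidate m computes pvSel of pvBits
theorem pvThetry (parts : List String) (m : Nat) (h1 : 1 ≤ m) (h2 : m < 2 ^ parts.length) :
    (PySem.List.pyRange 0
        (((pvPadChars (PySem.Chars.slice (PySem.Int.pyBin (m : Int)).toList (some 2) none)
            (parts.length : Int)).length : Nat) : Int)).foldl
      (fun thetry k =>
        if ('1' : Char) == PySem.List.pyGetD
            (pvPadChars (PySem.Chars.slice (PySem.Int.pyBin (m : Int)).toList (some 2) none)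
              (parts.length : Int)) k ' '
        then thetry ++ [(PySem.Str.pyGet? (PySem.List.pyGetD parts k "") 0).getD '?']
        else thetry) []
      = pvSel (parts.map pvFirst) (pvBits parts.length m) := by
  rw [pvBstr parts.length m h1 h2]
  set n := parts.length with hn
  set cs : List Char := (pvBits n m).map (fun b => if b then '1' else '0') with hcs
  have hcslen : cs.length = n := by simp [hcs, pvBits_length]
  rw [PySem.List.pyRange_zero_nat, List.foldl_map]
  have hstep : ∀ (a : List Char) (k : Nat), k ∈ List.range cs.length →
      (if ('1' : Char) == PySem.List.pyGetD cs ((k : Nat) : Int) ' '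
       then a ++ [(PySem.Str.pyGet? (PySem.List.pyGetD parts ((k : Nat) : Int) "") 0).getD '?']
       else a)
      = (if ('1' : Char) == cs.getD k ' '
         then a ++ [(parts.map pvFirst).getD k '?'] else a) := by
    intro a k hk
    rw [List.mem_range, hcslen] at hk
    rw [PySem.List.pyGetD_natCast, PySem.List.pyGetD_natCast]
    have h1' : (parts.map pvFirst).getD k '?' = pvFirst (parts.getD k "") := by
      rw [List.getD_eq_getElem _ _ (by simpa using hk), List.getD_eq_getElem _ _ hk]
      simp
    rw [h1']
    rfl
  have heq := PySem.List.foldl_congr_mem (List.range cs.length) _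
      (fun (a : List Char) (k : Nat) =>
        if ('1' : Char) == cs.getD k ' ' then a ++ [(parts.map pvFirst).getD k '?'] else a)
      ([] : List Char) hstep
  rw [heq, pvInner cs (parts.map pvFirst) [] (by simp [hcslen, hn])]
  have hmap : cs.map (fun c => decide (c = '1')) = pvBits n m := by
    rw [hcs, List.map_map]
    have : ((fun c => decide (c = '1')) ∘ fun b => if b then '1' else '0') = id := by
      funext b; cases b <;> simp
    rw [this, List.map_id]
  rw [hmap]
  simp

-- the characterisation of A's result
theorem pvA_iff (parts : List String) (input : String) :
    acronymInArray parts input = true ↔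
      ∃ bs : List Bool, bs.length = parts.length ∧ bs.any id = true ∧
        pvSel (parts.map pvFirst) bs = (PySem.Str.lower input).toList := by
  unfold acronymInArray
  rw [List.any_eq_true]
  have hpow : (((2 ^ parts.length : Nat) : Int)) = (2 : Int) ^ parts.length := by
    push_cast; ring
  constructor
  · rintro ⟨j, hmem, hbody⟩
    rw [PySem.List.mem_pyRange_one] at hmem
    obtain ⟨hj1, hj2⟩ := hmem
    have hm1 : 1 ≤ j.toNat := by omega
    have hm2 : j.toNat < 2 ^ parts.length := by
      have := hpow
      omega
    have hjcast : j = ((j.toNat : Nat) : Int) := by omega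
    rw [hjcast] at hbody
    simp only [] at hbody
    rw [pvThetry parts j.toNat hm1 hm2, beq_iff_eq] at hbody
    refine ⟨pvBits parts.length j.toNat, pvBits_length _ _, ?_, hbody⟩
    cases hany : (pvBits parts.length j.toNat).any id
    · exact absurd (pvBits_any parts.length j.toNat hm2 hany) (by omega)
    · rfl
  · rintro ⟨bs, hlen, hany, hsel⟩
    obtain ⟨m, hm, hbits⟩ := pvBits_surj bs
    rw [hlen] at hm hbits
    have hm1 : 1 ≤ m := by
      rcases Nat.eq_zero_or_pos m with rfl | h
      · rw [pvBits_zero] at hbits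
        subst hbits
        simp at hany
      · exact h
    refine ⟨(m : Int), ?_, ?_⟩
    · rw [PySem.List.mem_pyRange_one]
      constructor
      · omega
      · rw [← hpow]; omega
    · simp only []
      rw [pvThetry parts m hm1 hm, beq_iff_eq, hbits, hsel]

-- ===== VERDICT (by name: the statement is the Claim_ definition above) =====
theorem acronymInArray_spec : Claim_equal_acronymInArray := by
  intro parts input _ _
  unfold Spec_acronymInArray acronymInArray_alt
  simp only []
  set target := (PySem.Str.lower input).toList with ht
  set hs := parts.map pvFirst with hhs
  have hA := pvA_iff parts input
  cases hte : target.isEmpty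
  · simp only [Bool.false_eq_true, if_false]
    rw [List.isEmpty_eq_false_iff] at hte
    rw [pvIsSubseq_eq]
    cases hsub : target.isSublist hs
    · cases hval : acronymInArray parts input
      · rfl
      · exfalso
        obtain ⟨bs, hlen, hany, hsel⟩ := hA.mp hval
        have : target.Sublist hs := by
          rw [ht, ← hsel]; exact pvSel_sublist _ bs
        rw [← List.isSublist_iff_sublist] at this
        simp [hsub] at this
    · apply hA.mpr
      rw [List.isSublist_iff_sublist] at hsub
      obtain ⟨bs, hlen, hsel⟩ := pvSublist_sel target hs hsub
      refine ⟨bs, by simpa [hhs] using hlen, ?_, hsel⟩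
      cases hany : bs.any id
      · exact absurd (pvSel_all_false hs bs hany ▸ hsel) (fun h => hte h.symm)
      · rfl
  · simp only [if_true]
    rw [List.isEmpty_iff] at hte
    cases hval : acronymInArray parts input
    · rfl
    · exfalso
      obtain ⟨bs, hlen, hany, hsel⟩ := hA.mp hval
      exact pvSel_ne_nil hs bs (by simp [hhs, hlen]) hany (hsel.trans hte)
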